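-- pv_equiv track=rewrite | github.com/lingj715/hangmanGame | hangman_guess.py | check_all_line
-- ===== SOURCE A (Python) =====
-- def check_all_line(pattern):
--     result = ""
--     for s in pattern:
--         if s.count('_') != len(s):
--             return (False, "")
--         else:
--             if result == "":
--                 result = s
--             elif len(result) > len(s):
--                 result = s
--     return (True, result)
-- ===== SOURCE B (Python) =====
-- def check_all_line(pattern):
--     if not all(s.count('_') == len(s) for s in pattern):
--         return (False, "")
--     return (True, min(pattern, key=len, default=""))
-- ===== Notes on version B (the rewrite author's own statement) =====
-- stated objective: idiomatic
-- what changed: Replaced the fused single loop with its ''-sentinel accumulator and early return by two separate phases: validate every string with all(), then pick the shortest with the min() builtin (key=len, default='').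
-- intended difference: On all-underscore patterns that contain the empty string and end in a nonempty string, A's '' accumulator sentinel is reset by the empty string so it returns a longer string found after it (e.g. ['', '__'] -> (True, '__')), while B returns (True, ''), the genuinely shortest valid string, which is the intended value. — e.g. on check_all_line(["", "__"]): A returns (true, "__"), B returns (true, "")
import Mathlib
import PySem

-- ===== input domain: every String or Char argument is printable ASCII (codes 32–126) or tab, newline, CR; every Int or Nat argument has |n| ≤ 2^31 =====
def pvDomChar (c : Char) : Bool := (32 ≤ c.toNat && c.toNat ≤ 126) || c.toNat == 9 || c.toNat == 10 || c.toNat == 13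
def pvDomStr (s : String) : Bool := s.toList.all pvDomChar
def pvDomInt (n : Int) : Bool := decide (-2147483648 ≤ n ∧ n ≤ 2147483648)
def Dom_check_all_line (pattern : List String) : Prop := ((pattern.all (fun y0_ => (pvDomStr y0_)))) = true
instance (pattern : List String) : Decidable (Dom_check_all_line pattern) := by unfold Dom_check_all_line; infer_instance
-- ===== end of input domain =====

-- B replaces A's fused loop (''-sentinel accumulator, early return) by two phases: validate all strings, then take min by length.

-- ===== PORT A =====
-- the for-loop of A: state = the running `result`; early return (False, "") on an invalid string
def checkLoopA : List String → String → Bool × String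
  | [], result => (true, result)
  | s :: rest, result =>
    if (PySem.Str.count s "_" : Int) ≠ PySem.Str.len s then (false, "")
    else checkLoopA rest
      (if result = "" then s
       else if PySem.Str.len result > PySem.Str.len s then s
       else result)

def check_all_line (pattern : List String) : Bool × String :=
  checkLoopA pattern ""

-- ===== PORT B =====
def check_all_line_alt (pattern : List String) : Bool × String :=
  if pattern.all (fun s => (PySem.Str.count s "_" : Int) == PySem.Str.len s) then
    (true, PySem.List.minD pattern PySem.Str.len "")
  else
    (false, "")

-- ===== PRECONDITION & SPEC =====
-- On all-underscore patterns that contain "" and end in a nonempty string, A's ""-sentinel accumulator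
-- is reset by the empty string, so A returns a longer string found after it; B returns "", the genuinely
-- shortest valid string, which is the intended value.
def D_check_all_line (pattern : List String) : Prop :=
  (∀ s ∈ pattern, (PySem.Str.count s "_" : Int) = PySem.Str.len s) ∧
  "" ∈ pattern ∧ pattern.getLastD "" ≠ ""
instance (pattern : List String) : Decidable (D_check_all_line pattern) := by
  unfold D_check_all_line; infer_instance

def Spec_check_all_line (pattern : List String) (out : Bool × String) : Prop :=
  ¬ D_check_all_line pattern → out = check_all_line_alt pattern
instance (pattern : List String) (out : Bool × String) : Decidable (Spec_check_all_line pattern out) := by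
  unfold Spec_check_all_line; infer_instance

def pvDiffWitness_check_all_line : List String := ["", "__"]
def pvDiffWitnessOut_check_all_line : (Bool × String) × (Bool × String) := ((true, "__"), (true, ""))

-- ===== CLAIM (what is proved, stated in full; the proofs are below) =====
def Claim_unchanged_check_all_line : Prop := ∀ (pattern : List String), Dom_check_all_line pattern → Spec_check_all_line pattern (check_all_line pattern)
def Claim_changed_check_all_line : Prop := Dom_check_all_line (pvDiffWitness_check_all_line) ∧ D_check_all_line (pvDiffWitness_check_all_line) ∧ check_all_line (pvDiffWitness_check_all_line) = pvDiffWitnessOut_check_all_line.1 ∧ check_all_line_alt (pvDiffWitness_check_all_line) = pvDiffWitnessOut_check_all_line.2 ∧ pvDiffWitnessOut_check_all_line.1 ≠ pvDiffWitnessOut_check_all_line.2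
def Claim_exact_check_all_line : Prop := ∀ (pattern : List String), Dom_check_all_line pattern → D_check_all_line pattern → check_all_line pattern ≠ check_all_line_alt pattern

-- ===== LEMMAS AND PROOFS =====

-- A's accumulator update, and the accumulator update hidden inside Python's min(key=len)
def pvStep (r s : String) : String :=
  if r = "" then s else if PySem.Str.len r > PySem.Str.len s then s else r

def pvMinStep (m x : String) : String :=
  if PySem.Str.len x < PySem.Str.len m then x else m

theorem pvStrLen_nonneg (s : String) : 0 ≤ PySem.Str.len s := by
  simp [PySem.Str.len_eq]

theorem pvStrLen_eq_zero (s : String) (h : PySem.Str.len s = 0) : s = "" := by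
  have h' : s.toList = [] := by
    simpa [PySem.Str.len_eq, List.length_eq_zero_iff] using h
  simpa using h'

theorem pvStrLen_empty : PySem.Str.len "" = 0 := by
  simp [PySem.Str.len_eq]

theorem pvStrLen_pos (s : String) (h : s ≠ "") : 0 < PySem.Str.len s := by
  rcases lt_or_eq_of_le (pvStrLen_nonneg s) with hlt | heq
  · exact hlt
  · exact absurd (pvStrLen_eq_zero s heq.symm) h

theorem pvLoopA_invalid :
    ∀ (p : List String) (r : String),
      (¬ ∀ s ∈ p, (PySem.Str.count s "_" : Int) = PySem.Str.len s) →
      checkLoopA p r = (false, "") := by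
  intro p
  induction p with
  | nil => intro r h; exact absurd (by simp) h
  | cons s t ih =>
    intro r h
    by_cases hs : (PySem.Str.count s "_" : Int) = PySem.Str.len s
    · have ht : ¬ ∀ x ∈ t, (PySem.Str.count x "_" : Int) = PySem.Str.len x := by
        intro ht
        exact h (by
          intro x hx
          rcases List.mem_cons.mp hx with rfl | hx
          · exact hs
          · exact ht x hx)
      simp only [checkLoopA]
      rw [if_neg (not_not_intro hs)]
      exact ih _ ht
    · simp only [checkLoopA]
      rw [if_pos hs]

theorem pvLoopA_valid :
    ∀ (p : List String) (r : String),
      (∀ s ∈ p, (PySem.Str.count s "_" : Int) = PySem.Str.len s) →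
      checkLoopA p r = (true, p.foldl pvStep r) := by
  intro p
  induction p with
  | nil => intro r _; simp [checkLoopA]
  | cons s t ih =>
    intro r h
    have hs : (PySem.Str.count s "_" : Int) = PySem.Str.len s := h s (by simp)
    have ht : ∀ x ∈ t, (PySem.Str.count x "_" : Int) = PySem.Str.len x := by
      intro x hx; exact h x (by simp [hx])
    simp only [checkLoopA]
    rw [if_neg (not_not_intro hs), List.foldl_cons]
    exact ih _ ht

theorem pvMinD_cons (s : String) (t : List String) :
    PySem.List.minD (s :: t) PySem.Str.len "" = t.foldl pvMinStep s := by
  have go : ∀ (f : Option String → String → Option String),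
      (∀ m x, f (some m) x = some (pvMinStep m x)) →
      ∀ (u : List String) (m : String),
        (List.foldl f (some m) u).getD "" = u.foldl pvMinStep m := by
    intro f hf u
    induction u with
    | nil => intro m; rfl
    | cons x xs ih =>
      intro m
      simp only [List.foldl_cons]
      rw [hf m x]
      exact ih (pvMinStep m x)
  unfold PySem.List.minD PySem.List.min?
  simp only [List.foldl_cons]
  refine go _ (fun m x => ?_) t s
  show (if PySem.Str.len x < PySem.Str.len m then some x else some m) = some (pvMinStep m x)
  unfold pvMinStep
  split <;> rfl

theorem pvFoldl_step_eq_min :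
    ∀ (t : List String) (r : String), r ≠ "" → (∀ s ∈ t, s ≠ "") →
      t.foldl pvStep r = t.foldl pvMinStep r := by
  intro t
  induction t with
  | nil => intro r _ _; rfl
  | cons x xs ih =>
    intro r hr hall
    have hx : x ≠ "" := hall x (by simp)
    have hstep : pvStep r x = pvMinStep r x := by
      unfold pvStep pvMinStep
      rw [if_neg hr]
    have hne : pvMinStep r x ≠ "" := by
      unfold pvMinStep; split_ifs
      · exact hx
      · exact hr
    simp only [List.foldl_cons, hstep]
    exact ih _ hne (fun s hs => hall s (by simp [hs]))

theorem pvStep_empty (r : String) : pvStep r "" = "" := by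
  unfold pvStep
  split_ifs with h1 h2
  · rfl
  · rfl
  · exact absurd (pvStrLen_pos r h1) (by
      have h0 : PySem.Str.len "" = 0 := pvStrLen_empty
      omega)

theorem pvFoldl_last_empty :
    ∀ (t : List String) (r : String), t ≠ [] → t.getLastD "" = "" →
      t.foldl pvStep r = "" := by
  intro t
  induction t with
  | nil => intro r h _; exact absurd rfl h
  | cons x xs ih =>
    intro r _ hlast
    cases xs with
    | nil =>
      have hx : x = "" := by simpa [List.getLastD] using hlast
      simp [List.foldl_cons, hx, pvStep_empty]
    | cons y ys =>
      have hys : (y :: ys).getLastD "" = "" := by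
        have h1 : (x :: y :: ys).getLastD "" = (y :: ys).getLastD x := List.getLastD_cons
        have h2 : (y :: ys).getLastD x = (y :: ys).getLastD "" := by
          cases h : (y :: ys).getLast? with
          | none => simp [List.getLast?_eq_none_iff] at h
          | some z => simp [List.getLastD_eq_getLast?, h]
        rw [h1, h2] at hlast
        exact hlast
      simpa [List.foldl_cons] using ih (pvStep r x) (by simp) hys

theorem pvFoldl_last_ne :
    ∀ (t : List String) (r : String), t.getLastD r ≠ "" → t.foldl pvStep r ≠ "" := by
  intro t
  induction t with
  | nil => intro r h; simpa [List.getLastD] using h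
  | cons x xs ih =>
    intro r hlast
    have hlast' : xs.getLastD x ≠ "" := by
      rw [show (x :: xs).getLastD r = xs.getLastD x from List.getLastD_cons] at hlast
      exact hlast
    cases xs with
    | nil =>
      have hx : x ≠ "" := by simpa [List.getLastD] using hlast'
      have hne : pvStep r x ≠ "" := by
        unfold pvStep; split_ifs with h1 h2
        · exact hx
        · exact hx
        · exact h1
      simpa [List.foldl_cons] using hne
    | cons y ys =>
      have hys : (y :: ys).getLastD (pvStep r x) ≠ "" := by
        cases h : (y :: ys).getLast? with
        | none => simp [List.getLast?_eq_none_iff] at h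
        | some z =>
          simp only [List.getLastD_eq_getLast?, h] at hlast' ⊢
          exact hlast'
      simpa [List.foldl_cons] using ih (pvStep r x) hys

theorem pvMinD_empty_mem (pattern : List String) (h : "" ∈ pattern) :
    PySem.List.minD pattern PySem.Str.len "" = "" := by
  cases hm : PySem.List.min? pattern PySem.Str.len with
  | none =>
    rw [PySem.List.min?_eq_none_iff] at hm
    subst hm; simp at h
  | some m =>
    have hle : PySem.Str.len m ≤ PySem.Str.len "" := PySem.List.min?_isMin hm "" h
    have hzero : PySem.Str.len m = 0 := by
      have h0 : PySem.Str.len "" = 0 := pvStrLen_empty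
      have := pvStrLen_nonneg m
      omega
    have hm' : m = "" := pvStrLen_eq_zero m hzero
    simp [PySem.List.minD, hm, hm']

theorem pvAltGuard (pattern : List String) :
    (pattern.all (fun s => (PySem.Str.count s "_" : Int) == PySem.Str.len s)) = true ↔
      ∀ s ∈ pattern, (PySem.Str.count s "_" : Int) = PySem.Str.len s := by
  simp

-- ===== VERDICT (by name: the statement is the Claim_ definition above) =====
theorem check_all_line_spec : Claim_unchanged_check_all_line := by
  unfold Claim_unchanged_check_all_line Spec_check_all_line
  intro pattern _ hD
  by_cases hall : ∀ s ∈ pattern, (PySem.Str.count s "_" : Int) = PySem.Str.len s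
  · have hA : check_all_line pattern = (true, pattern.foldl pvStep "") := by
      unfold check_all_line; exact pvLoopA_valid pattern "" hall
    have hB : check_all_line_alt pattern = (true, PySem.List.minD pattern PySem.Str.len "") := by
      unfold check_all_line_alt
      rw [if_pos ((pvAltGuard pattern).mpr hall)]
    rw [hA, hB]
    cases pattern with
    | nil => rfl
    | cons s t =>
      by_cases hmem : "" ∈ s :: t
      · have hlast : (s :: t).getLastD "" = "" := by
          by_contra hlast
          exact hD ⟨hall, hmem, hlast⟩
        rw [pvFoldl_last_empty (s :: t) "" (by simp) hlast,
            pvMinD_empty_mem (s :: t) hmem]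
      · have hs : s ≠ "" := fun h => hmem (by simp [h])
        have ht : ∀ x ∈ t, x ≠ "" := fun x hx h => hmem (by simp [h ▸ hx])
        have h1 : (s :: t).foldl pvStep "" = t.foldl pvStep s := by
          simp [List.foldl_cons, pvStep]
        rw [h1, pvFoldl_step_eq_min t s hs ht, pvMinD_cons]
  · have hA : check_all_line pattern = (false, "") := pvLoopA_invalid pattern "" hall
    have hB : check_all_line_alt pattern = (false, "") := by
      unfold check_all_line_alt
      rw [if_neg (fun hg => hall ((pvAltGuard pattern).mp hg))]
    rw [hA, hB]

theorem check_all_line_changed : Claim_changed_check_all_line := by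
  unfold Claim_changed_check_all_line; decide

theorem check_all_line_tight : Claim_exact_check_all_line := by
  unfold Claim_exact_check_all_line
  intro pattern _ hD heq
  obtain ⟨hall, hmem, hlast⟩ := hD
  have hA : check_all_line pattern = (true, pattern.foldl pvStep "") := by
    unfold check_all_line; exact pvLoopA_valid pattern "" hall
  have hB : check_all_line_alt pattern = (true, "") := by
    unfold check_all_line_alt
    rw [if_pos ((pvAltGuard pattern).mpr hall), pvMinD_empty_mem pattern hmem]
  rw [hA, hB] at heq
  have hsnd : pattern.foldl pvStep "" = "" := congrArg Prod.snd heq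
  exact pvFoldl_last_ne pattern "" hlast hsnd
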